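-- pv_equiv track=rewrite | github.com/lsh0107/solving_algorithms | 프로그래머스/2/87390. n＾2 배열 자르기/n＾2 배열 자르기.py | solution
-- ===== SOURCE A (Python) =====
-- def solution(n, left, right):
--     answer = []
--     x, y = 0, 0
--
--     for i in range(left, right+1):
--         x = i//n
--         y = i%n
--         answer.append(max(x, y)+1)
--
--     return answer
-- ===== SOURCE B (Python) =====
-- def solution(n, left, right):
--     answer = []
--     r0, r1 = left // n, right // n
--     for r in range(r0, r1 + 1):
--         c0 = left % n if r == r0 else 0
--         c1 = right % n if r == r1 else n - 1
--         for c in range(c0, c1 + 1):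
--             answer.append(max(r, c) + 1)
--     return answer
-- ===== Notes on version B (the rewrite author's own statement) =====
-- stated objective: alternative
-- what changed: B replaces A's single flat loop with one divmod per index by a nested row-then-column traversal of the grid: it computes the start/end rows once with two floor divisions and then emits max(r,c)+1 over explicit column ranges, doing no division in the inner loop.
-- outside the precondition, e.g. on solution(-3, 0, 2): A returns [1, 0, 0], B returns []; on solution(0, 0, 2): A raises ZeroDivisionError, B raises ZeroDivisionError
import Mathlib
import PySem

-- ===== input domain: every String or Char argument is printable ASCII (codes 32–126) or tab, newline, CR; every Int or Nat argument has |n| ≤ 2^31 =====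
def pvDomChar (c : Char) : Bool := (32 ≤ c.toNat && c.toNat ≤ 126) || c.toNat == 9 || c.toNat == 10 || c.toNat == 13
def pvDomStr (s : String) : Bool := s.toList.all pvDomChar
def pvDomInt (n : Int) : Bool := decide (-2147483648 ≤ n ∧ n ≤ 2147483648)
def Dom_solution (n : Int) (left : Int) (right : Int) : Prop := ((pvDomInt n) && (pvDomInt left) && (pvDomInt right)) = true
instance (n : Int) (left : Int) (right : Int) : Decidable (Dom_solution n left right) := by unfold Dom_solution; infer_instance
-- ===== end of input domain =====

-- B traverses the grid row by row with explicit column bounds instead of A's flat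
-- index loop with a divmod per element; same cost, different decomposition.

-- ===== PORT A =====
def solution (n : Int) (left : Int) (right : Int) : List Int :=
  (PySem.List.pyRange left (right + 1) 1).foldl
    (fun answer i =>
      let x := PySem.Int.floordiv i n
      let y := PySem.Int.mod i n
      answer ++ [max x y + 1]) []

-- ===== PORT B =====
def solution_alt (n : Int) (left : Int) (right : Int) : List Int :=
  let r0 := PySem.Int.floordiv left n
  let r1 := PySem.Int.floordiv right n
  (PySem.List.pyRange r0 (r1 + 1) 1).foldl
    (fun answer r =>
      let c0 := if r = r0 then PySem.Int.mod left n else 0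
      let c1 := if r = r1 then PySem.Int.mod right n else n - 1
      (PySem.List.pyRange c0 (c1 + 1) 1).foldl
        (fun answer c => answer ++ [max r c + 1]) answer) []

-- ===== PRECONDITION & SPEC =====
-- Pre_ excludes n ≤ 0: for n = 0 A raises ZeroDivisionError, and a non-positive
-- grid size n is outside the task's natural domain (A's values there are
-- floor-division accidents of a meaningless grid).
def Pre_solution (n : Int) (left : Int) (right : Int) : Prop := 1 ≤ n
instance (n : Int) (left : Int) (right : Int) : Decidable (Pre_solution n left right) := by unfold Pre_solution; infer_instance
def pvWitness_solution : Int × Int × Int := (3, 2, 5)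

def Spec_solution (n : Int) (left : Int) (right : Int) (out : List Int) : Prop := out = solution_alt n left right
instance (n : Int) (left : Int) (right : Int) (out : List Int) : Decidable (Spec_solution n left right out) := by unfold Spec_solution; infer_instance

-- ===== CLAIM (what is proved, stated in full; the proofs are below) =====
def Claim_equal_solution : Prop := ∀ (n : Int) (left : Int) (right : Int), Dom_solution n left right → Pre_solution n left right → Spec_solution n left right (solution n left right)

-- ===== LEMMAS AND PROOFS =====

-- A is the map of max(i//n, i%n)+1 over the flat range.
theorem solution_eq_map (n left right : Int) :
    solution n left right
      = (PySem.List.pyRange left (right + 1) 1).map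
          (fun i => max (PySem.Int.floordiv i n) (PySem.Int.mod i n) + 1) := by
  unfold solution
  simpa using PySem.List.foldl_append_singleton_eq_map
    (f := fun i => max (PySem.Int.floordiv i n) (PySem.Int.mod i n) + 1)
    (l := PySem.List.pyRange left (right + 1) 1) (acc := [])

-- 'for r: for c in g(r): out.append(F r c)' is the flatMap of the column maps.
theorem foldl_nested_append {α β γ : Type} (F : α → β → γ) (g : α → List β)
    (l : List α) (acc : List γ) :
    l.foldl (fun a r => (g r).foldl (fun a c => a ++ [F r c]) a) acc
      = acc ++ l.flatMap (fun r => (g r).map (F r)) := by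
  induction l generalizing acc with
  | nil => simp
  | cons x xs ih =>
    rw [List.foldl_cons, PySem.List.foldl_append_singleton_eq_map, ih, List.flatMap_cons,
        List.append_assoc]

theorem solution_alt_eq_flatMap (n left right : Int) :
    solution_alt n left right
      = (PySem.List.pyRange (PySem.Int.floordiv left n) (PySem.Int.floordiv right n + 1) 1).flatMap
          (fun r =>
            (PySem.List.pyRange
                (if r = PySem.Int.floordiv left n then PySem.Int.mod left n else 0)
                ((if r = PySem.Int.floordiv right n then PySem.Int.mod right n else n - 1) + 1) 1).map
              (fun c => max r c + 1)) := by
  unfold solution_alt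
  exact foldl_nested_append (fun r c => max r c + 1)
    (fun r => PySem.List.pyRange
        (if r = PySem.Int.floordiv left n then PySem.Int.mod left n else 0)
        ((if r = PySem.Int.floordiv right n then PySem.Int.mod right n else n - 1) + 1) 1)
    (PySem.List.pyRange (PySem.Int.floordiv left n) (PySem.Int.floordiv right n + 1) 1) []

-- Within one row (fd a = r, b ≤ (r+1)*n) the flat map equals the shifted column map.
theorem row_map (n r a b : Int) (hn : 0 < n)
    (ha : PySem.Int.floordiv a n = r) (hb : b ≤ (r + 1) * n) :
    (PySem.List.pyRange a b 1).map
        (fun i => max (PySem.Int.floordiv i n) (PySem.Int.mod i n) + 1)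
      = (PySem.List.pyRange (PySem.Int.mod a n) (b - r * n) 1).map
          (fun c => max r c + 1) := by
  have hdm := PySem.Int.floordiv_mul_add_mod a n
  rw [ha] at hdm
  have hman := PySem.Int.mod_nonneg a hn
  have hmal := PySem.Int.mod_lt a hn
  have hmul : (r + 1) * n = r * n + n := by ring
  have hK : b - a = (b - r * n) - PySem.Int.mod a n := by omega
  rw [PySem.List.pyRange_one a b, PySem.List.pyRange_one (PySem.Int.mod a n) (b - r * n),
      List.map_map, List.map_map, hK]
  apply List.map_congr_left
  intro k hk
  have hk' : (k : Int) < (b - r * n) - PySem.Int.mod a n := by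
    have := List.mem_range.mp hk
    omega
  have hlow : r * n ≤ a + (k : Int) := by omega
  have hhigh : a + (k : Int) < (r + 1) * n := by omega
  have hfd : PySem.Int.floordiv (a + (k : Int)) n = r :=
    (PySem.Int.floordiv_eq_iff_of_pos hn).mpr ⟨hlow, hhigh⟩
  have hdm2 := PySem.Int.floordiv_mul_add_mod (a + (k : Int)) n
  rw [hfd] at hdm2
  have hmd : PySem.Int.mod (a + (k : Int)) n = PySem.Int.mod a n + (k : Int) := by omega
  simp only [Function.comp]
  rw [hfd, hmd]

-- Main decomposition lemma: the flat scan splits into the rows, by induction on the row count.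
theorem rows_aux (n R : Int) (hn : 0 < n) :
    ∀ (k : Nat) (L : Int),
      (PySem.Int.floordiv R n - PySem.Int.floordiv L n).toNat = k →
      (PySem.List.pyRange (PySem.Int.floordiv L n) (PySem.Int.floordiv R n + 1) 1).flatMap
          (fun r =>
            (PySem.List.pyRange
                (if r = PySem.Int.floordiv L n then PySem.Int.mod L n else 0)
                ((if r = PySem.Int.floordiv R n then PySem.Int.mod R n else n - 1) + 1) 1).map
              (fun c => max r c + 1))
        = (PySem.List.pyRange L (R + 1) 1).map
            (fun i => max (PySem.Int.floordiv i n) (PySem.Int.mod i n) + 1) := by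
  intro k
  induction k with
  | zero =>
    intro L hk
    have hdmR := PySem.Int.floordiv_mul_add_mod R n
    have hmRn := PySem.Int.mod_nonneg R hn
    have hmRl := PySem.Int.mod_lt R hn
    by_cases hlt : PySem.Int.floordiv R n < PySem.Int.floordiv L n
    · -- no rows at all: L > R, both sides empty
      have hdmL := PySem.Int.floordiv_mul_add_mod L n
      have hRL : R < L := by
        by_contra h
        have hm : PySem.Int.floordiv L n ≤ PySem.Int.floordiv R n := by
          rw [PySem.Int.floordiv_eq_ediv_of_pos hn, PySem.Int.floordiv_eq_ediv_of_pos hn]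
          exact Int.ediv_le_ediv hn (by omega)
        omega
      rw [PySem.List.pyRange_one_eq_nil (by omega), PySem.List.pyRange_one_eq_nil (by omega)]
      simp
    · -- a single row
      have heq : PySem.Int.floordiv L n = PySem.Int.floordiv R n := by omega
      rw [← heq] at hdmR ⊢
      have hmul : (PySem.Int.floordiv L n + 1) * n = PySem.Int.floordiv L n * n + n := by ring
      rw [PySem.List.pyRange_one_singleton]
      simp only [List.flatMap_cons, List.flatMap_nil, List.append_nil]
      rw [row_map n (PySem.Int.floordiv L n) L (R + 1) hn rfl (by omega)]
      rw [show R + 1 - PySem.Int.floordiv L n * n = PySem.Int.mod R n + 1 from by omega]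
      simp
  | succ k ih =>
    intro L hk
    have hdmL := PySem.Int.floordiv_mul_add_mod L n
    have hdmR := PySem.Int.floordiv_mul_add_mod R n
    have hmLn := PySem.Int.mod_nonneg L hn
    have hmLl := PySem.Int.mod_lt L hn
    have hmRn := PySem.Int.mod_nonneg R hn
    have hmRl := PySem.Int.mod_lt R hn
    have hlt : PySem.Int.floordiv L n < PySem.Int.floordiv R n := by omega
    set r := PySem.Int.floordiv L n with hr
    set E := (r + 1) * n with hE
    have hEeq : E = r * n + n := by rw [hE]; ring
    have hfdE : PySem.Int.floordiv E n = r + 1 := by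
      apply (PySem.Int.floordiv_eq_iff_of_pos hn).mpr
      have h2 : (r + 1 + 1) * n = r * n + n + n := by ring
      omega
    have hmdE : PySem.Int.mod E n = 0 := by
      have hdmE := PySem.Int.floordiv_mul_add_mod E n
      rw [hfdE] at hdmE
      omega
    have hEleR : E ≤ R := by
      have h1 : r + 1 ≤ PySem.Int.floordiv R n := by omega
      have h2 : (r + 1) * n ≤ PySem.Int.floordiv R n * n :=
        mul_le_mul_of_nonneg_right h1 (by omega)
      omega
    have hLltE : L < E := by omega
    rw [PySem.List.pyRange_one_cons (by omega : r < PySem.Int.floordiv R n + 1),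
        List.flatMap_cons]
    have hhead :
        (PySem.List.pyRange
            (if r = r then PySem.Int.mod L n else 0)
            ((if r = PySem.Int.floordiv R n then PySem.Int.mod R n else n - 1) + 1) 1).map
          (fun c => max r c + 1)
          = (PySem.List.pyRange L E 1).map
              (fun i => max (PySem.Int.floordiv i n) (PySem.Int.mod i n) + 1) := by
      rw [if_pos rfl, if_neg (by omega : ¬ r = PySem.Int.floordiv R n)]
      rw [show (n - 1 + 1 : Int) = E - r * n from by omega]
      exact (row_map n r L E hn hr.symm (le_of_eq hE.symm)).symm
    have htail :
        (PySem.List.pyRange (r + 1) (PySem.Int.floordiv R n + 1) 1).flatMap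
            (fun r' =>
              (PySem.List.pyRange
                  (if r' = r then PySem.Int.mod L n else 0)
                  ((if r' = PySem.Int.floordiv R n then PySem.Int.mod R n else n - 1) + 1) 1).map
                (fun c => max r' c + 1))
          = (PySem.List.pyRange E (R + 1) 1).map
              (fun i => max (PySem.Int.floordiv i n) (PySem.Int.mod i n) + 1) := by
      have hcong :
          (PySem.List.pyRange (r + 1) (PySem.Int.floordiv R n + 1) 1).flatMap
              (fun r' =>
                (PySem.List.pyRange
                    (if r' = r then PySem.Int.mod L n else 0)
                    ((if r' = PySem.Int.floordiv R n then PySem.Int.mod R n else n - 1) + 1) 1).map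
                  (fun c => max r' c + 1))
            = (PySem.List.pyRange (PySem.Int.floordiv E n) (PySem.Int.floordiv R n + 1) 1).flatMap
                (fun r' =>
                  (PySem.List.pyRange
                      (if r' = PySem.Int.floordiv E n then PySem.Int.mod E n else 0)
                      ((if r' = PySem.Int.floordiv R n then PySem.Int.mod R n else n - 1) + 1) 1).map
                    (fun c => max r' c + 1)) := by
        rw [hfdE]
        apply List.flatMap_congr
        intro r' hmem
        have hb := (PySem.List.mem_pyRange_one).mp hmem
        rw [if_neg (by omega : ¬ r' = r), hmdE]
        by_cases h : r' = r + 1 <;> simp [h]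
      rw [hcong]
      exact ih E (by rw [hfdE]; omega)
    rw [hhead, htail, ← List.map_append,
        ← PySem.List.pyRange_one_append L E (R + 1) (by omega) (by omega)]

-- ===== VERDICT (by name: the statement is the Claim_ definition above) =====
theorem solution_spec : Claim_equal_solution := by
  intro n left right _ hpre
  unfold Spec_solution
  rw [solution_eq_map, solution_alt_eq_flatMap]
  exact (rows_aux n right (by exact hpre) _ left rfl).symm
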